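-- pv_equiv track=rewrite | github.com/sweatka/2019-2-level-labs | lab_1/main.py | filter_stop_words
-- ===== SOURCE A (Python) =====
-- def filter_stop_words(d, stop_words):
--     digits = [1, 2, 3, 4, 5, 6, 7, 8, 9, 0]
--     if stop_words is None:
--         return {}
--     elif d is None:
--         return {}
--     else:
--         keys = [k for k, v in d.items() if k in digits]
--         for n in keys:
--             del d[n]
--         keys2 = [k for k, v in d.items() if k in stop_words]
--         for i in keys2:
--             del d[i]
--         return d
-- ===== SOURCE B (Python) =====
-- def filter_stop_words(d, stop_words):
--     digits = [1, 2, 3, 4, 5, 6, 7, 8, 9, 0]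
--     if stop_words is None:
--         return {}
--     elif d is None:
--         return {}
--     kept = {k: v for k, v in d.items() if k not in digits and k not in stop_words}
--     d.clear()
--     d.update(kept)
--     return d
-- ===== Notes on version B (the rewrite author's own statement) =====
-- stated objective: simpler
-- what changed: A collects digit keys and stop-word keys in two separate scan-then-delete passes that mutate the dict entry by entry; B builds the kept entries in one filtering dict comprehension and rebuilds the dict with clear()+update(), preserving the in-place mutation and returned object.
import Mathlib
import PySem

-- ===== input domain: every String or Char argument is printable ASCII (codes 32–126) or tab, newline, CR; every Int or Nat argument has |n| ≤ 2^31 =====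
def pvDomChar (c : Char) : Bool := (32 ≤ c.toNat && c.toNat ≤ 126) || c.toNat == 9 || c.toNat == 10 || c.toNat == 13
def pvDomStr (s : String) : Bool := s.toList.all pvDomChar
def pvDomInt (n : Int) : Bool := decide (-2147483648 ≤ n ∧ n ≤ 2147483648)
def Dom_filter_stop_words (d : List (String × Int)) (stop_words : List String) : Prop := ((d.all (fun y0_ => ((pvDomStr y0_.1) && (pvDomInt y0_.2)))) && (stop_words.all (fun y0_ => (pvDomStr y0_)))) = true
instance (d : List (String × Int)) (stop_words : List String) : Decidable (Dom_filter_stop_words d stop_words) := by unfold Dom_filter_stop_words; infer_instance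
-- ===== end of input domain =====

-- B rebuilds the dict with one filtering comprehension + clear()/update() instead of A's two
-- collect-keys-then-delete passes (objective: simpler). Both mutate d in place in Python; the
-- equivalence proved here is about the returned mapping.

-- ===== PORT A =====
-- Python '==' between a str key and an int is always False (exact: 'k in digits' never fires for string keys)
def pyStrEqInt (_s : String) (_n : Int) : Bool := false

-- del d[k] on the items list: remove the (unique, under Pre_) entry with key k
def pyDelKey (d : List (String × Int)) (k : String) : List (String × Int) :=
  d.eraseP (fun p => p.1 == k)

def filter_stop_words (d : List (String × Int)) (stop_words : List String) : List (String × Int) :=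
  let digits : List Int := [1, 2, 3, 4, 5, 6, 7, 8, 9, 0]
  let keys := (d.filter (fun kv => digits.any (fun n => pyStrEqInt kv.1 n))).map (·.1)
  let d1 := keys.foldl (fun acc n => pyDelKey acc n) d
  let keys2 := (d1.filter (fun kv => stop_words.contains kv.1)).map (·.1)
  let d2 := keys2.foldl (fun acc i => pyDelKey acc i) d1
  d2

-- ===== PORT B =====
def filter_stop_words_alt (d : List (String × Int)) (stop_words : List String) : List (String × Int) :=
  let digits : List Int := [1, 2, 3, 4, 5, 6, 7, 8, 9, 0]
  -- kept = {k: v for k, v in d.items() if k not in digits and k not in stop_words}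
  let kept : PySem.Dict String Int :=
    d.foldl (fun acc kv =>
      if !(digits.any (fun n => pyStrEqInt kv.1 n)) && !(stop_words.contains kv.1)
      then acc.insert kv.1 kv.2 else acc) PySem.Dict.empty
  -- d.clear(); d.update(kept); return d  — the returned mapping is kept's items
  kept.items

-- ===== PRECONDITION & SPEC =====
-- Pre_ excludes association lists with duplicate keys: a Python dict cannot hold duplicate keys,
-- so such lists do not denote a dict input A is ever given (A's list-level behaviour there is accidental).
def Pre_filter_stop_words (d : List (String × Int)) (stop_words : List String) : Prop :=
  (d.map Prod.fst).Nodup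

instance (d : List (String × Int)) (stop_words : List String) : Decidable (Pre_filter_stop_words d stop_words) := by unfold Pre_filter_stop_words; infer_instance

def pvWitness_filter_stop_words : (List (String × Int)) × List String :=
  ([("the", 3), ("cat", 2), ("7", 1)], ["the", "of"])

def Spec_filter_stop_words (d : List (String × Int)) (stop_words : List String) (out : List (String × Int)) : Prop := out = filter_stop_words_alt d stop_words
instance (d : List (String × Int)) (stop_words : List String) (out : List (String × Int)) : Decidable (Spec_filter_stop_words d stop_words out) := by unfold Spec_filter_stop_words; infer_instance

-- ===== CLAIM (what is proved, stated in full; the proofs are below) =====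
def Claim_equal_filter_stop_words : Prop := ∀ (d : List (String × Int)) (stop_words : List String), Dom_filter_stop_words d stop_words → Pre_filter_stop_words d stop_words → Spec_filter_stop_words d stop_words (filter_stop_words d stop_words)

-- ===== LEMMAS AND PROOFS =====

-- deleting the unique entry with key k is filtering it out
theorem pyDelKey_eq_filter (d : List (String × Int)) (k : String)
    (h : (d.map Prod.fst).Nodup) :
    pyDelKey d k = d.filter (fun p => !(p.1 == k)) := by
  induction d with
  | nil => rfl
  | cons a t ih =>
    simp only [List.map_cons, List.nodup_cons] at h
    unfold pyDelKey at *
    by_cases hk : a.1 = k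
    · have hbeq : (a.1 == k) = true := beq_iff_eq.mpr hk
      rw [List.eraseP_cons, List.filter_cons]
      simp only [hbeq, cond_true, Bool.not_true, if_neg Bool.false_ne_true]
      refine (List.filter_eq_self.mpr ?_).symm
      intro p hp
      simp only [Bool.not_eq_eq_eq_not, Bool.not_true, beq_eq_false_iff_ne, ne_eq]
      intro hpk
      exact h.1 (by rw [hk, ← hpk]; exact List.mem_map_of_mem hp)
    · have hbeq : (a.1 == k) = false := beq_eq_false_iff_ne.mpr hk
      rw [List.eraseP_cons, List.filter_cons]
      simp [hbeq, ih h.2]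

theorem nodup_keys_filter (d : List (String × Int)) (p : String × Int → Bool)
    (h : (d.map Prod.fst).Nodup) : ((d.filter p).map Prod.fst).Nodup :=
  h.sublist ((d.filter_sublist).map Prod.fst)

-- the delete loop over a key list is one filter
theorem foldl_delKey_eq_filter (ks : List String) (d : List (String × Int))
    (h : (d.map Prod.fst).Nodup) :
    ks.foldl (fun acc k => pyDelKey acc k) d
      = d.filter (fun kv => !(ks.contains kv.1)) := by
  induction ks generalizing d with
  | nil => simp
  | cons k ks ih =>
    simp only [List.foldl_cons]
    rw [pyDelKey_eq_filter d k h, ih _ (nodup_keys_filter d _ h), List.filter_filter]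
    refine List.filter_congr ?_
    intro a _
    have hbk : (a.1 == k) = decide (k = a.1) := by
      by_cases hkk : a.1 = k
      · simp [hkk]
      · simp [hkk, Ne.symm hkk]
    simp only [List.contains_cons, Bool.not_or, hbk, Bool.and_comm]

-- B's comprehension fold is one filter (fresh distinct keys append in order)
theorem alt_eq_filter (d : List (String × Int)) (p : String × Int → Bool)
    (h : (d.map Prod.fst).Nodup) :
    (d.foldl (fun acc kv => if p kv then acc.insert kv.1 kv.2 else acc)
        (PySem.Dict.empty : PySem.Dict String Int)).items
      = d.filter p := by
  rw [← List.foldl_filter]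
  rw [PySem.Dict.items_foldl_insert_fresh (d.filter p) Prod.fst Prod.snd PySem.Dict.empty
      (fun a _ => PySem.Dict.contains_empty a.1) (nodup_keys_filter d p h)]
  simp [PySem.Dict.empty]

-- ===== VERDICT (by name: the statement is the Claim_ definition above) =====
theorem filter_stop_words_spec : Claim_equal_filter_stop_words := by
  intro d stop_words _ hpre
  unfold Spec_filter_stop_words filter_stop_words filter_stop_words_alt
  have hdig : ∀ kv : String × Int,
      ([(1:Int),2,3,4,5,6,7,8,9,0].any (fun n => pyStrEqInt kv.1 n)) = false := by
    intro kv; simp [pyStrEqInt]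
  simp only [hdig, Bool.not_false, Bool.true_and, List.filter_false, List.map_nil,
    List.foldl_nil]
  rw [alt_eq_filter d _ hpre, foldl_delKey_eq_filter _ d hpre]
  refine List.filter_congr ?_
  intro a ha
  have hiff : (a.1 ∈ (d.filter (fun kv => stop_words.contains kv.1)).map (·.1))
      ↔ a.1 ∈ stop_words := by
    constructor
    · intro hmem
      obtain ⟨b, hb, hba⟩ := List.mem_map.mp hmem
      obtain ⟨hbd, hbs⟩ := List.mem_filter.mp hb
      rw [hba] at hbs
      simpa [List.contains_eq_mem] using hbs
    · intro hmem
      exact List.mem_map_of_mem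
        (List.mem_filter.mpr ⟨ha, by simpa [List.contains_eq_mem] using hmem⟩)
  have hc : ((d.filter (fun kv => stop_words.contains kv.1)).map (·.1)).contains a.1
      = stop_words.contains a.1 := by
    rw [List.contains_eq_mem, List.contains_eq_mem]
    exact decide_eq_decide.mpr hiff
  rw [hc]
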